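-- pv_equiv track=rewrite | github.com/MonsieurNam/object_video_retrieval | query_library_v8.py | apply_post_processing
-- ===== SOURCE A (Python) =====
-- def fill_gaps(frame_list: list, max_gap_size: int = 15) -> list:
--     """Lấp đầy các khoảng trống nhỏ trong danh sách frame liên tiếp."""
--     if len(frame_list) < 2:
--         return frame_list
--
--     filled_list = []
--     frame_set = set(frame_list)
--     min_frame, max_frame = frame_list[0], frame_list[-1]
--
--     for frame_num in range(min_frame, max_frame + 1):
--         if frame_num in frame_set:
--             filled_list.append(frame_num)
--         else:
--             prev_in_set = max((f for f in frame_set if f < frame_num), default=None)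
--             next_in_set = min((f for f in frame_set if f > frame_num), default=None)
--
--             if prev_in_set is not None and next_in_set is not None:
--                 gap = next_in_set - prev_in_set
--                 if gap <= max_gap_size + 1:
--                     filled_list.append(frame_num)
--
--     return filled_list
--
-- def apply_post_processing(result_dict: dict, max_gap: int = 20) -> dict:
--     """Áp dụng hậu xử lý lấp đầy khoảng trống cho kết quả cuối cùng."""
--     if not result_dict: return {}
--
--     processed_dict = {}
--     for video, frames in result_dict.items():
--         if frames:
--             sorted_frames = sorted(frames)
--             processed_dict[video] = fill_gaps(sorted_frames, max_gap_size=max_gap)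
--         else:
--             processed_dict[video] = []
--
--     return processed_dict
-- ===== SOURCE B (Python) =====
-- def _fill_runs(s, max_gap):
--     # s: strictly increasing list of frames, non-empty
--     filled = []
--     for p, q in zip(s, s[1:]):
--         filled.append(p)
--         if q - p <= max_gap + 1:
--             filled.extend(range(p + 1, q))
--     filled.append(s[-1])
--     return filled
--
-- def apply_post_processing(result_dict: dict, max_gap: int = 20) -> dict:
--     return {video: _fill_runs(sorted(set(frames)), max_gap) if frames else []
--             for video, frames in result_dict.items()}
-- ===== Notes on version B (the rewrite author's own statement) =====
-- stated objective: faster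
-- what changed: fill_gaps is replaced by one pass over consecutive pairs of the sorted distinct frames that emits each small gap's interior directly, instead of scanning range(min,max+1) and re-searching the whole set for prev/next at every missing frame.
import Mathlib
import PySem

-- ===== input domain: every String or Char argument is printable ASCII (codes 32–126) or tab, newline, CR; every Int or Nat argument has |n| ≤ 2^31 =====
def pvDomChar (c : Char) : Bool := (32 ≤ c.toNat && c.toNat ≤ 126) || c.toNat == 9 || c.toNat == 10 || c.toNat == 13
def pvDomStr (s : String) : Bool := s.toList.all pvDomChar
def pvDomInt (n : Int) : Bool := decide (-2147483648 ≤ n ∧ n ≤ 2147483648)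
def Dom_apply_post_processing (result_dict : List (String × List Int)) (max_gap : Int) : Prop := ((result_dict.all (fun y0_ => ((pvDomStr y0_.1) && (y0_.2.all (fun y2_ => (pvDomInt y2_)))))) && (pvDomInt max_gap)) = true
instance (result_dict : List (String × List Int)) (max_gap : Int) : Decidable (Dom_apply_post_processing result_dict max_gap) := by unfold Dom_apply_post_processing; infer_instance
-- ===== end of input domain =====

-- B replaces fill_gaps's scan of range(min,max+1) (with a fresh prev/next search of the whole
-- set at every missing frame) by one pass over consecutive pairs of the sorted distinct frames,
-- emitting the interior of each small gap directly (objective: faster).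

-- ===== PORT A =====
-- fill_gaps, step for step.  frame_list[0] / frame_list[-1] are taken under the guard
-- len(frame_list) >= 2, so headI / getLastD are exact there.
def pvFillGaps (frame_list : List Int) (max_gap_size : Int) : List Int :=
  if frame_list.length < 2 then frame_list
  else
    let frame_set : PySem.Set Int := PySem.Set.ofList frame_list
    let min_frame : Int := frame_list.headI
    let max_frame : Int := frame_list.getLastD 0
    (PySem.List.pyRange min_frame (max_frame + 1) 1).foldl (fun filled frame_num =>
      if frame_num ∈ frame_set then filled ++ [frame_num]
      else
        let prev_in_set := PySem.List.max? (frame_set.filter (fun f => decide (f < frame_num))) (fun y => y)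
        let next_in_set := PySem.List.min? (frame_set.filter (fun f => decide (frame_num < f))) (fun y => y)
        match prev_in_set, next_in_set with
        | some p, some n =>
            if n - p ≤ max_gap_size + 1 then filled ++ [frame_num] else filled
        | _, _ => filled) []

def apply_post_processing (result_dict : List (String × List Int)) (max_gap : Int) : List (String × List Int) :=
  if result_dict.isEmpty then []
  else
    ((PySem.Dict.ofList result_dict).items.foldl
      (fun (pd : PySem.Dict String (List Int)) kv =>
        if kv.2 ≠ [] then
          pd.insert kv.1 (pvFillGaps (PySem.List.sorted kv.2 (fun x => x) false) max_gap)
        else pd.insert kv.1 []) PySem.Dict.empty).items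

-- ===== PORT B =====
-- one pass over zip(s, s[1:]) of the sorted distinct frames (s[1:] of a list = tail);
-- s[-1] is taken on a non-empty s, so getLastD is exact.
def pvFillRuns (s : List Int) (max_gap : Int) : List Int :=
  ((s.zip s.tail).foldl (fun filled pq =>
      let filled := filled ++ [pq.1]
      if pq.2 - pq.1 ≤ max_gap + 1 then filled ++ PySem.List.pyRange (pq.1 + 1) pq.2 1
      else filled) []) ++ [s.getLastD 0]

def apply_post_processing_alt (result_dict : List (String × List Int)) (max_gap : Int) : List (String × List Int) :=
  (PySem.Dict.ofList result_dict).items.map (fun kv =>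
    (kv.1, if kv.2 ≠ [] then
             pvFillRuns (PySem.List.sorted (PySem.Set.ofList kv.2) (fun x => x) false) max_gap
           else []))

-- ===== PRECONDITION & SPEC =====
def Spec_apply_post_processing (result_dict : List (String × List Int)) (max_gap : Int) (out : List (String × List Int)) : Prop := out = apply_post_processing_alt result_dict max_gap
instance (result_dict : List (String × List Int)) (max_gap : Int) (out : List (String × List Int)) : Decidable (Spec_apply_post_processing result_dict max_gap out) := by unfold Spec_apply_post_processing; infer_instance

-- ===== CLAIM (what is proved, stated in full; the proofs are below) =====
def Claim_equal_apply_post_processing : Prop := ∀ (result_dict : List (String × List Int)) (max_gap : Int), Dom_apply_post_processing result_dict max_gap → Spec_apply_post_processing result_dict max_gap (apply_post_processing result_dict max_gap)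

-- ===== LEMMAS AND PROOFS =====

-- reference shape of the filled list over the strictly increasing distinct frames
def pvG (mg : Int) : List Int → List Int
  | [] => []
  | [a] => [a]
  | a :: b :: t =>
      a :: ((if b - a ≤ mg + 1 then PySem.List.pyRange (a + 1) b 1 else []) ++ pvG mg (b :: t))

-- the per-frame contribution of A's range loop
def pvBody (F : List Int) (mg : Int) (x : Int) : List Int :=
  if x ∈ F then [x]
  else
    match PySem.List.max? (F.filter (fun f => decide (f < x))) (fun y => y),
          PySem.List.min? (F.filter (fun f => decide (x < f))) (fun y => y) with
    | some p, some n => if n - p ≤ mg + 1 then [x] else []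
    | _, _ => []

theorem pvHeadI_mem {l : List Int} (h : l ≠ []) : l.headI ∈ l := by
  cases l with
  | nil => exact absurd rfl h
  | cons a t => exact List.mem_cons_self

theorem pvGetLastD_mem {l : List Int} (h : l ≠ []) : l.getLastD 0 ∈ l := by
  induction l with
  | nil => exact absurd rfl h
  | cons a t ih =>
    cases t with
    | nil => simp
    | cons b t' => simpa using List.mem_cons_of_mem a (ih (by simp))

theorem pvHeadI_le {l : List Int} (hp : l.Pairwise (· ≤ ·)) : ∀ x ∈ l, l.headI ≤ x := by
  cases l with
  | nil => intro x hx; cases hx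
  | cons a t =>
    intro x hx
    rcases List.mem_cons.mp hx with rfl | hx
    · simp
    · exact (List.pairwise_cons.mp hp).1 x hx

theorem pvLe_getLastD {l : List Int} (hp : l.Pairwise (· ≤ ·)) : ∀ x ∈ l, x ≤ l.getLastD 0 := by
  induction l with
  | nil => intro x hx; cases hx
  | cons a t ih =>
    intro x hx
    rcases List.pairwise_cons.mp hp with ⟨ha, hpt⟩
    cases t with
    | nil =>
      simp only [List.mem_singleton] at hx
      simp [hx]
    | cons b t' =>
      rcases List.mem_cons.mp hx with rfl | hx
      · have hmem : b ≤ (b :: t').getLastD 0 := ih hpt _ List.mem_cons_self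
        have hab : x ≤ b := ha b List.mem_cons_self
        calc x ≤ b := hab
          _ ≤ (b :: t').getLastD 0 := hmem
          _ = (x :: b :: t').getLastD 0 := by simp [List.getLastD_cons]
      · calc x ≤ (b :: t').getLastD 0 := ih hpt x hx
          _ = (a :: b :: t').getLastD 0 := by simp [List.getLastD_cons]

theorem pvFlatMap_id {l : List Int} {f : Int → List Int} (h : ∀ x ∈ l, f x = [x]) :
    l.flatMap f = l := by
  induction l with
  | nil => rfl
  | cons a t ih =>
    simp [List.flatMap_cons, h a List.mem_cons_self,
      ih (fun x hx => h x (List.mem_cons_of_mem a hx))]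

theorem pvFlatMap_nil {l : List Int} {f : Int → List Int} (h : ∀ x ∈ l, f x = []) :
    l.flatMap f = [] := by
  induction l with
  | nil => rfl
  | cons a t ih =>
    simp [List.flatMap_cons, h a List.mem_cons_self,
      ih (fun x hx => h x (List.mem_cons_of_mem a hx))]

-- B's pair loop equals the reference shape
theorem pvFillRuns_eq_pvG (mg : Int) : ∀ (s : List Int), s ≠ [] → pvFillRuns s mg = pvG mg s := by
  have hbody : ∀ (filled : List Int) (pq : Int × Int),
      (let filled' := filled ++ [pq.1];
       if pq.2 - pq.1 ≤ mg + 1 then filled' ++ PySem.List.pyRange (pq.1 + 1) pq.2 1 else filled')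
      = filled ++ ([pq.1] ++ if pq.2 - pq.1 ≤ mg + 1 then PySem.List.pyRange (pq.1 + 1) pq.2 1 else []) := by
    intro filled pq
    by_cases h : pq.2 - pq.1 ≤ mg + 1 <;> simp [h]
  intro s hs
  have hflat : ∀ s : List Int, pvFillRuns s mg =
      (s.zip s.tail).flatMap
        (fun pq => [pq.1] ++ if pq.2 - pq.1 ≤ mg + 1 then PySem.List.pyRange (pq.1 + 1) pq.2 1 else [])
      ++ [s.getLastD 0] := by
    intro s
    unfold pvFillRuns
    rw [show (fun (filled : List Int) (pq : Int × Int) =>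
        let filled' := filled ++ [pq.1];
        if pq.2 - pq.1 ≤ mg + 1 then filled' ++ PySem.List.pyRange (pq.1 + 1) pq.2 1 else filled')
      = (fun filled pq => filled ++ ([pq.1] ++ if pq.2 - pq.1 ≤ mg + 1 then PySem.List.pyRange (pq.1 + 1) pq.2 1 else []))
      from funext fun filled => funext fun pq => hbody filled pq]
    rw [PySem.List.foldl_append_eq_flatMap]
    simp
  induction s with
  | nil => exact absurd rfl hs
  | cons a t ih =>
    cases t with
    | nil => simp [pvFillRuns, pvG]
    | cons b t' =>
      rw [hflat]
      have ihb := ih (by simp)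
      rw [hflat] at ihb
      simp only [List.tail_cons, List.zip_cons_cons, List.flatMap_cons]
      have hlast : (a :: b :: t').getLastD 0 = (b :: t').getLastD 0 := by
        cases t' <;> simp [List.getLastD_cons]
      rw [hlast]
      simp only [pvG, List.append_assoc]
      rw [← ihb]
      simp

-- members of a strictly sorted cons are bounded below by the second element
theorem pvTail_ge {b : Int} {t : List Int} (hp : (b :: t).Pairwise (· < ·)) :
    ∀ y ∈ b :: t, b ≤ y := by
  intro y hy
  rcases List.mem_cons.mp hy with rfl | hy
  · exact le_refl y
  · exact le_of_lt ((List.pairwise_cons.mp hp).1 y hy)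

-- A's range loop over a strictly sorted s equals the reference shape
theorem pvA_core (mg : Int) (F : List Int) :
    ∀ (s : List Int), s ≠ [] → s.Pairwise (· < ·) →
      (∀ x ∈ s, x ∈ F) → (∀ x ∈ F, x < s.headI ∨ x ∈ s) →
      (PySem.List.pyRange s.headI (s.getLastD 0 + 1) 1).flatMap (pvBody F mg) = pvG mg s := by
  intro s
  induction s with
  | nil => intro hs; exact absurd rfl hs
  | cons a t ih =>
    intro _ hp hsub hside
    cases t with
    | nil =>
      have h1 : ([a] : List Int).getLastD 0 = a := rfl
      simp only [List.headI, h1]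
      rw [PySem.List.pyRange_one_singleton]
      simp [pvBody, hsub a List.mem_cons_self, pvG]
    | cons b t' =>
      have hab : a < b := (List.pairwise_cons.mp hp).1 b List.mem_cons_self
      have hpt : (b :: t').Pairwise (· < ·) := (List.pairwise_cons.mp hp).2
      have hlast : (a :: b :: t').getLastD 0 = (b :: t').getLastD 0 := by
        cases t' <;> simp [List.getLastD_cons]
      have hbM : b ≤ (b :: t').getLastD 0 :=
        pvLe_getLastD (hpt.imp le_of_lt) b List.mem_cons_self
      simp only [List.headI, hlast]
      rw [PySem.List.pyRange_one_append a b ((b :: t').getLastD 0 + 1) (le_of_lt hab) (by omega)]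
      rw [List.flatMap_append]
      rw [PySem.List.pyRange_one_cons hab, List.flatMap_cons]
      have hbodya : pvBody F mg a = [a] := by
        simp [pvBody, hsub a List.mem_cons_self]
      -- middle chunk: every x strictly between a and b
      have hmid : ∀ x ∈ PySem.List.pyRange (a + 1) b 1,
          pvBody F mg x = if b - a ≤ mg + 1 then [x] else [] := by
        intro x hx
        have hxr := (PySem.List.mem_pyRange_one).mp hx
        have hax : a < x := by omega
        have hxb : x < b := by omega
        have hxs : x ∉ (a :: b :: t') := by
          intro hxs
          rcases List.mem_cons.mp hxs with rfl | hxs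
          · omega
          · have := pvTail_ge hpt x hxs; omega
        have hxF : x ∉ F := by
          intro hxF
          rcases hside x hxF with h | h
          · simp only [List.headI] at h; omega
          · exact hxs h
        have hmax : PySem.List.max? (F.filter (fun f => decide (f < x))) (fun y => y) = some a := by
          have haf : a ∈ F.filter (fun f => decide (f < x)) := by
            simp [List.mem_filter, hsub a List.mem_cons_self, hax]
          cases hm : PySem.List.max? (F.filter (fun f => decide (f < x))) (fun y => y) with
          | none =>
            rw [PySem.List.max?_eq_none_iff] at hm
            rw [hm] at haf; cases haf
          | some m =>
            have hmm := PySem.List.max?_mem hm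
            have hmF := (List.mem_filter.mp hmm).1
            have hmx : m < x := by simpa using (List.mem_filter.mp hmm).2
            have hma : m ≤ a := by
              rcases hside m hmF with h | h
              · simp only [List.headI] at h; omega
              · rcases List.mem_cons.mp h with rfl | h
                · exact le_refl m
                · have := pvTail_ge hpt m h; omega
            have ham : a ≤ m := PySem.List.max?_isMax hm a haf
            exact congrArg some (le_antisymm hma ham)
        have hmin : PySem.List.min? (F.filter (fun f => decide (x < f))) (fun y => y) = some b := by
          have hbf : b ∈ F.filter (fun f => decide (x < f)) := by
            simp [List.mem_filter, hsub b (List.mem_cons_of_mem a List.mem_cons_self), hxb]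
          cases hm : PySem.List.min? (F.filter (fun f => decide (x < f))) (fun y => y) with
          | none =>
            rw [PySem.List.min?_eq_none_iff] at hm
            rw [hm] at hbf; cases hbf
          | some n =>
            have hnm := PySem.List.min?_mem hm
            have hnF := (List.mem_filter.mp hnm).1
            have hxn : x < n := by simpa using (List.mem_filter.mp hnm).2
            have hbn : b ≤ n := by
              rcases hside n hnF with h | h
              · simp only [List.headI] at h; omega
              · rcases List.mem_cons.mp h with rfl | h
                · omega
                · exact pvTail_ge hpt n h
            have hnb : n ≤ b := PySem.List.min?_isMin hm b hbf
            exact congrArg some (le_antisymm hnb hbn)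
        simp [pvBody, hxF, hmax, hmin]
      have hchunk : (PySem.List.pyRange (a + 1) b 1).flatMap (pvBody F mg)
          = if b - a ≤ mg + 1 then PySem.List.pyRange (a + 1) b 1 else [] := by
        by_cases hg : b - a ≤ mg + 1
        · rw [if_pos hg]
          exact pvFlatMap_id (fun x hx => by rw [hmid x hx, if_pos hg])
        · rw [if_neg hg]
          exact pvFlatMap_nil (fun x hx => by rw [hmid x hx, if_neg hg])
      have hrest : (PySem.List.pyRange b ((b :: t').getLastD 0 + 1) 1).flatMap (pvBody F mg)
          = pvG mg (b :: t') := by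
        have hside' : ∀ x ∈ F, x < (b :: t').headI ∨ x ∈ b :: t' := by
          intro x hxF
          rcases hside x hxF with h | h
          · simp only [List.headI] at h ⊢; omega
          · rcases List.mem_cons.mp h with rfl | h
            · simp only [List.headI]; omega
            · exact Or.inr h
        have := ih (by simp) hpt (fun x hx => hsub x (List.mem_cons_of_mem a hx)) hside'
        simpa using this
      rw [hbodya, hchunk, hrest]
      simp [pvG]

-- abstract form: fill_gaps over a sorted list L equals B's pass over the strictly sorted s
-- when L and s have the same members
theorem pvFill_core (mg : Int) (L s : List Int)
    (hmem : ∀ x, x ∈ L ↔ x ∈ s) (hLp : L.Pairwise (· ≤ ·)) (hsp : s.Pairwise (· < ·))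
    (hLne : L ≠ []) (hsne : s ≠ []) :
    pvFillGaps L mg = pvFillRuns s mg := by
  by_cases hlen : L.length < 2
  · cases L with
    | nil => exact absurd rfl hLne
    | cons a t =>
      cases t with
      | cons b t' => simp at hlen
      | nil =>
        have hsx : s = [a] := by
          cases s with
          | nil => exact absurd rfl hsne
          | cons c r =>
            have hca : c = a := by
              have := (hmem c).mpr List.mem_cons_self
              simpa using this
            subst hca
            cases r with
            | nil => rfl
            | cons d r' =>
              have hdc : c < d := (List.pairwise_cons.mp hsp).1 d List.mem_cons_self
              have : d = c := by
                have := (hmem d).mpr (List.mem_cons_of_mem c List.mem_cons_self)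
                simpa using this
              omega
        rw [hsx]
        simp [pvFillGaps, pvFillRuns]
  · have hHead : L.headI = s.headI := by
      have h1 : L.headI ≤ s.headI :=
        pvHeadI_le hLp _ ((hmem _).mpr (pvHeadI_mem hsne))
      have h2 : s.headI ≤ L.headI :=
        pvHeadI_le (hsp.imp le_of_lt) _ ((hmem _).mp (pvHeadI_mem hLne))
      omega
    have hLast : L.getLastD 0 = s.getLastD 0 := by
      have h1 : L.getLastD 0 ≤ s.getLastD 0 :=
        pvLe_getLastD (hsp.imp le_of_lt) _ ((hmem _).mp (pvGetLastD_mem hLne))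
      have h2 : s.getLastD 0 ≤ L.getLastD 0 :=
        pvLe_getLastD hLp _ ((hmem _).mpr (pvGetLastD_mem hsne))
      omega
    simp only [pvFillGaps, if_neg hlen]
    have hfun : (fun (filled : List Int) (frame_num : Int) =>
        if frame_num ∈ PySem.Set.ofList L then filled ++ [frame_num]
        else
          match PySem.List.max? (List.filter (fun f => decide (f < frame_num)) (PySem.Set.ofList L)) fun y => y,
            PySem.List.min? (List.filter (fun f => decide (frame_num < f)) (PySem.Set.ofList L)) fun y => y with
          | some p, some n => if n - p ≤ mg + 1 then filled ++ [frame_num] else filled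
          | _, _ => filled)
        = fun (acc : List Int) (x : Int) => acc ++ pvBody (PySem.Set.ofList L) mg x := by
      funext filled x
      by_cases hx : x ∈ (PySem.Set.ofList L : PySem.Set Int)
      · simp [pvBody, hx]
      · rcases hm : PySem.List.max? (List.filter (fun f => decide (f < x)) (PySem.Set.ofList L)) (fun y => y) with _ | p <;>
          rcases hn : PySem.List.min? (List.filter (fun f => decide (x < f)) (PySem.Set.ofList L)) (fun y => y) with _ | n <;>
          simp [pvBody, hx, hm, hn]; split_ifs <;> simp
    rw [hfun]
    rw [PySem.List.foldl_append_eq_flatMap, List.nil_append]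
    rw [hHead, hLast]
    rw [pvA_core mg (PySem.Set.ofList L) s hsne hsp
      (fun x hx => (PySem.Set.mem_ofList L x).mpr ((hmem x).mpr hx))
      (fun x hx => Or.inr ((hmem x).mp ((PySem.Set.mem_ofList L x).mp hx)))]
    exact (pvFillRuns_eq_pvG mg s hsne).symm

-- fill_gaps over the sorted frames equals B's single pass over the sorted distinct frames
theorem pvFill_eq (mg : Int) (frames : List Int) (hne : frames ≠ []) :
    pvFillGaps (PySem.List.sorted frames (fun x => x) false) mg
      = pvFillRuns (PySem.List.sorted (PySem.Set.ofList frames) (fun x => x) false) mg := by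
  obtain ⟨y, hy⟩ := List.exists_mem_of_ne_nil frames hne
  refine pvFill_core mg _ _ ?_ ?_ (PySem.List.sorted_ofList_pairwise_lt frames) ?_ ?_
  · intro x
    rw [PySem.List.mem_sorted, PySem.List.mem_sorted, PySem.Set.mem_ofList]
  · have := PySem.List.sorted_pairwise (xs := frames) (key := fun x => x)
    simpa using this
  · exact List.ne_nil_of_mem ((PySem.List.mem_sorted frames _ false y).mpr hy)
  · exact List.ne_nil_of_mem
      ((PySem.List.mem_sorted (PySem.Set.ofList frames) _ false y).mpr ((PySem.Set.mem_ofList frames y).mpr hy))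

theorem apply_post_processing_spec : Claim_equal_apply_post_processing := by
  unfold Claim_equal_apply_post_processing
  intro rd mg _
  unfold Spec_apply_post_processing
  cases rd with
  | nil => rfl
  | cons hd tl =>
    rw [apply_post_processing, if_neg (by simp)]
    have hbody : (fun (pd : PySem.Dict String (List Int)) (kv : String × List Int) =>
        if kv.2 ≠ [] then
          pd.insert kv.1 (pvFillGaps (PySem.List.sorted kv.2 (fun x => x) false) mg)
        else pd.insert kv.1 [])
        = fun (pd : PySem.Dict String (List Int)) kv =>
            pd.insert kv.1 (if kv.2 ≠ [] then pvFillGaps (PySem.List.sorted kv.2 (fun x => x) false) mg else []) := by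
      funext pd kv
      by_cases h : kv.2 = [] <;> simp [h]
    rw [hbody]
    rw [PySem.Dict.items_foldl_insert_fresh (PySem.Dict.ofList (hd :: tl)).items Prod.fst
        (fun kv => if kv.2 ≠ [] then pvFillGaps (PySem.List.sorted kv.2 (fun x => x) false) mg else [])
        PySem.Dict.empty (fun a _ => by simp [pysem])
        (by exact PySem.Dict.nodup_keys_ofList (hd :: tl))]
    rw [apply_post_processing_alt]
    rw [show (PySem.Dict.empty : PySem.Dict String (List Int)).items = [] from rfl, List.nil_append]
    apply List.map_congr_left
    intro kv _
    by_cases h : kv.2 = []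
    · simp [h]
    · simp only [h, ne_eq, not_false_eq_true, if_pos]
      exact congrArg (fun z => (kv.1, z)) (pvFill_eq mg kv.2 h)
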